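-- pv_equiv track=rewrite | github.com/iownthegame/AdventofCode2020 | day20.py | process_grids
-- ===== SOURCE A (Python) =====
-- def process_grids(data):
--     tiles = {}
--     current_num = None
--     current_grid = []
--
--     for line in data:
--         if 'Tile' in line:
--             current_num = line.split(' ')[1][:-1]
--             tiles[current_num] = {}
--             continue
--
--         if not line:
--             tiles[current_num]['grid'] = current_grid
--             tiles[current_num]['edges'] = get_edges(current_grid)
--
--             current_num = None
--             current_grid = []
--             continue
--
--         current_grid.append(line)
--
--     tiles[current_num]['grid'] = current_grid
--     tiles[current_num]['edges'] = get_edges(current_grid)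
--
--     return tiles
--
-- def get_edges(grid):
--     edges = []
--     edges.append(grid[0])
--     edges.append(grid[-1])
--     edges.append(''.join([row[0] for row in grid]))
--     edges.append(''.join([row[-1] for row in grid]))
--     return edges
-- ===== SOURCE B (Python) =====
-- def process_grids(data):
--     # Split into blank-line-separated blocks, then build one dict entry per block.
--     blocks = [[]]
--     for line in data:
--         if line == "":
--             blocks.append([])
--         else:
--             blocks[-1].append(line)
--
--     tiles = {}
--     for block in blocks:
--         grid = [line for line in block if 'Tile' not in line]
--         num = None
--         for line in block:
--             if 'Tile' in line:
--                 num = line.split(' ')[1][:-1]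
--                 tiles[num] = {}
--         tiles[num] = {'grid': grid, 'edges': get_edges(grid)}
--     return tiles
--
-- def get_edges(grid):
--     edges = []
--     edges.append(grid[0])
--     edges.append(grid[-1])
--     edges.append(''.join([row[0] for row in grid]))
--     edges.append(''.join([row[-1] for row in grid]))
--     return edges
-- ===== Notes on version B (the rewrite author's own statement) =====
-- stated objective: alternative
-- what changed: B first partitions the input into blank-line-separated blocks and builds one dict entry per block, instead of A's single pass driven by running current_num/current_grid state that flushes at each blank line.
-- outside the precondition, e.g. on process_grids([]): A raises KeyError, B raises IndexError
import Mathlib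
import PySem

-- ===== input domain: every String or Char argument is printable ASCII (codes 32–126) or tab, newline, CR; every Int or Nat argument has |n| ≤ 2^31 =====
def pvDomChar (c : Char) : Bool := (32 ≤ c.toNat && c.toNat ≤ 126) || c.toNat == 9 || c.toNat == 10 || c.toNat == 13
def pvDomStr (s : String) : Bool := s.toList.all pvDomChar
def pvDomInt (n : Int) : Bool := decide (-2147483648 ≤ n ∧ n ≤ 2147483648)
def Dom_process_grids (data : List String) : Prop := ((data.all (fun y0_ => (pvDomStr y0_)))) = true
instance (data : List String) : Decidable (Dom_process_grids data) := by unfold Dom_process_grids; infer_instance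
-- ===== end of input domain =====

-- B replaces A's single pass with running current_num/current_grid flags by a split into
-- blank-separated blocks and one dict entry per block (same cost; alternative decomposition).

-- ===== PORT A =====

-- shared helper of both Python files (identical text in Source A and Source B): get_edges(grid)
-- grid[0] / grid[-1] / row[0] / row[-1] via pyGet?; none = IndexError, excluded by Pre_ (getD junk there)
def get_edges (grid : List String) : List String :=
  let edges : List String := []
  let edges := edges ++ [(PySem.List.pyGet? grid 0).getD ""]
  let edges := edges ++ [(PySem.List.pyGet? grid (-1)).getD ""]
  let edges := edges ++ [String.ofList (grid.map (fun row => (PySem.Str.pyGet? row 0).getD ' '))]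
  let edges := edges ++ [String.ofList (grid.map (fun row => (PySem.Str.pyGet? row (-1)).getD ' '))]
  edges

-- shared subexpression of both Python files: line.split(' ')[1][:-1]
-- split(' ') is total for the non-empty separator; [1] raises IndexError when absent (excluded by Pre_)
def pvParseNum (line : String) : String :=
  PySem.Str.slice ((PySem.List.pyGet? ((PySem.Str.split? line " ").getD []) 1).getD "") none (some (-1))

abbrev pvInner := PySem.Dict String (List String)
abbrev pvTiles := PySem.Dict String pvInner

-- the flush A performs at a blank line and at the end:
-- tiles[current_num]['grid'] = current_grid; tiles[current_num]['edges'] = get_edges(current_grid)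
-- current_num = None means Python raises KeyError (excluded by Pre_); the port returns tiles unchanged there
def pvFlushA (t : pvTiles) (n : Option String) (g : List String) : pvTiles :=
  match n with
  | none => t
  | some k =>
      let t := t.modify k PySem.Dict.empty (fun inn => inn.insert "grid" g)
      t.modify k PySem.Dict.empty (fun inn => inn.insert "edges" (get_edges g))

-- A's loop body over (tiles, current_num, current_grid)
def pvStepA (st : pvTiles × Option String × List String) (line : String) :
    pvTiles × Option String × List String :=
  if PySem.Str.isIn "Tile" line then
    let num := pvParseNum line
    (st.1.insert num PySem.Dict.empty, some num, st.2.2)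
  else if line = "" then
    (pvFlushA st.1 st.2.1 st.2.2, none, [])
  else
    (st.1, st.2.1, st.2.2 ++ [line])

def process_grids (data : List String) : List (String × List (String × List String)) :=
  (pvFlushA (data.foldl pvStepA (PySem.Dict.empty, none, [])).1
      (data.foldl pvStepA (PySem.Dict.empty, none, [])).2.1
      (data.foldl pvStepA (PySem.Dict.empty, none, [])).2.2).items.map
    (fun p => (p.1, p.2.items))

-- ===== PORT B =====

-- blocks = [[]]; for line in data: append to blocks[-1] or start a new block (cur is blocks[-1])
def pvBlocks : List String → List String → List (List String)
  | cur, [] => [cur]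
  | cur, l :: rest => if l = "" then cur :: pvBlocks [] rest else pvBlocks (cur ++ [l]) rest

-- tiles[num] = {'grid': grid, 'edges': get_edges(grid)}
-- num = None means Source B inserts a None key (outside Pre_); the port returns tiles unchanged there
def pvFlushB (t : pvTiles) (n : Option String) (g : List String) : pvTiles :=
  match n with
  | none => t
  | some k => t.insert k (PySem.Dict.ofList [("grid", g), ("edges", get_edges g)])

-- one block: grid = non-'Tile' lines; each 'Tile' header inserts {} and sets num; final assignment
def pvBlockB (t : pvTiles) (block : List String) : pvTiles :=
  let g := block.filter (fun line => !PySem.Str.isIn "Tile" line)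
  let st := block.foldl
    (fun (p : pvTiles × Option String) line =>
      if PySem.Str.isIn "Tile" line then
        let num := pvParseNum line
        (p.1.insert num PySem.Dict.empty, some num)
      else p)
    (t, none)
  pvFlushB st.1 st.2 g

def process_grids_alt (data : List String) : List (String × List (String × List String)) :=
  ((pvBlocks [] data).foldl pvBlockB PySem.Dict.empty).items.map (fun p => (p.1, p.2.items))

-- ===== PRECONDITION & SPEC =====
-- Pre_ holds exactly where Python A returns normally: every 'Tile' line has a space
-- (else IndexError on split(' ')[1]), and every blank-separated segment contains a 'Tile'
-- header (else KeyError on tiles[None]) and a non-'Tile' line (else IndexError in get_edges([])).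
def Pre_process_grids (data : List String) : Prop :=
  (∀ line ∈ data, PySem.Str.isIn "Tile" line = true → PySem.Str.isIn " " line = true) ∧
  ∀ seg ∈ data.splitOnP (· == ""),
    (∃ l ∈ seg, PySem.Str.isIn "Tile" l = true) ∧ (∃ l ∈ seg, PySem.Str.isIn "Tile" l = false)
instance (data : List String) : Decidable (Pre_process_grids data) := by
  unfold Pre_process_grids; infer_instance

def pvWitness_process_grids : List String :=
  ["Tile 11:", "#.", ".#", "", "Tile 7:", "ab", "cd"]

def Spec_process_grids (data : List String) (out : List (String × List (String × List String))) : Prop :=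
  out = process_grids_alt data
instance (data : List String) (out : List (String × List (String × List String))) :
    Decidable (Spec_process_grids data out) := by unfold Spec_process_grids; infer_instance

-- ===== CLAIM (what is proved, stated in full; the proofs are below) =====
def Claim_equal_process_grids : Prop :=
  ∀ (data : List String), Dom_process_grids data → Pre_process_grids data →
    Spec_process_grids data (process_grids data)

-- ===== LEMMAS AND PROOFS =====

-- proof-side spine: A's loop with B's one-shot flush
def pvGo (t : pvTiles) (n : Option String) (g : List String) : List String → pvTiles
  | [] => pvFlushB t n g
  | l :: rest =>
    if PySem.Str.isIn "Tile" l then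
      pvGo (t.insert (pvParseNum l) PySem.Dict.empty) (some (pvParseNum l)) g rest
    else if l = "" then pvGo (pvFlushB t n g) none [] rest
    else pvGo t n (g ++ [l]) rest

-- proof-side per-block runner: header/append steps interleaved, then the flush
def pvBlockGen (t : pvTiles) (n : Option String) (g : List String) : List String → pvTiles
  | [] => pvFlushB t n g
  | l :: rest =>
    if PySem.Str.isIn "Tile" l then
      pvBlockGen (t.insert (pvParseNum l) PySem.Dict.empty) (some (pvParseNum l)) g rest
    else pvBlockGen t n (g ++ [l]) rest

lemma pvFlushA_eq_pvFlushB (t : pvTiles) (n : Option String) (g : List String)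
    (h : ∀ k, n = some k → t.get? k = some PySem.Dict.empty) :
    pvFlushA t n g = pvFlushB t n g := by
  cases n with
  | none => rfl
  | some k =>
      have hk := h k rfl
      show (t.modify k PySem.Dict.empty (fun inn => inn.insert "grid" g)).modify k
          PySem.Dict.empty (fun inn => inn.insert "edges" (get_edges g)) = _
      have hg : t.getD k PySem.Dict.empty = PySem.Dict.empty := by
        rw [PySem.Dict.getD_eq_get?_getD, hk]; rfl
      have h1 : t.modify k PySem.Dict.empty (fun inn => inn.insert "grid" g)
          = t.insert k (PySem.Dict.empty.insert "grid" g) := by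
        show t.insert k ((t.getD k PySem.Dict.empty).insert "grid" g) = _
        rw [hg]
      rw [h1]
      show (t.insert k (PySem.Dict.empty.insert "grid" g)).insert k
          (((t.insert k (PySem.Dict.empty.insert "grid" g)).getD k PySem.Dict.empty).insert
            "edges" (get_edges g)) = _
      rw [PySem.Dict.getD_insert_self, PySem.Dict.insert_insert_self]
      rfl

-- A's fold (plus final flush) equals pvGo, under the invariant that the current tile's
-- entry is still the freshly inserted {}
lemma pvA_eq_pvGo (data : List String) :
    ∀ (t : pvTiles) (n : Option String) (g : List String),
      (∀ k, n = some k → t.get? k = some PySem.Dict.empty) →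
      pvFlushA (data.foldl pvStepA (t, n, g)).1 (data.foldl pvStepA (t, n, g)).2.1
        (data.foldl pvStepA (t, n, g)).2.2 = pvGo t n g data := by
  induction data with
  | nil => intro t n g h; exact pvFlushA_eq_pvFlushB t n g h
  | cons l rest ih =>
      intro t n g h
      rw [List.foldl_cons]
      by_cases hT : PySem.Str.isIn "Tile" l = true
      · have hstep : pvStepA (t, n, g) l
            = (t.insert (pvParseNum l) PySem.Dict.empty, some (pvParseNum l), g) := by
          unfold pvStepA; rw [if_pos hT]
        have hgo : pvGo t n g (l :: rest)
            = pvGo (t.insert (pvParseNum l) PySem.Dict.empty) (some (pvParseNum l)) g rest := by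
          simp only [pvGo]; rw [if_pos hT]
        rw [hstep, hgo]
        refine ih _ _ _ ?_
        intro k hk
        have hkk : pvParseNum l = k := Option.some.inj hk
        rw [← hkk]
        exact PySem.Dict.get?_insert_self _ _ _
      · by_cases hb : l = ""
        · have hstep : pvStepA (t, n, g) l = (pvFlushA t n g, none, []) := by
            unfold pvStepA; rw [if_neg hT, if_pos hb]
          have hgo : pvGo t n g (l :: rest) = pvGo (pvFlushB t n g) none [] rest := by
            simp only [pvGo]; rw [if_neg hT, if_pos hb]
          rw [hstep, hgo, pvFlushA_eq_pvFlushB t n g h]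
          exact ih _ _ _ (by intro k hk; cases hk)
        · have hstep : pvStepA (t, n, g) l = (t, n, g ++ [l]) := by
            unfold pvStepA; rw [if_neg hT, if_neg hb]
          have hgo : pvGo t n g (l :: rest) = pvGo t n (g ++ [l]) rest := by
            simp only [pvGo]; rw [if_neg hT, if_neg hb]
          rw [hstep, hgo]
          exact ih _ _ _ h

-- pvBlockGen over a blank-free list is pvGo over it
lemma pvBlockGen_eq_pvGo (cur : List String) :
    ∀ (t : pvTiles) (n : Option String) (g : List String), "" ∉ cur →
      pvBlockGen t n g cur = pvGo t n g cur := by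
  induction cur with
  | nil => intro t n g _; rfl
  | cons l rest ih =>
      intro t n g hc
      have hl : l ≠ "" := fun h => hc (h ▸ List.mem_cons_self)
      have hr : "" ∉ rest := fun h => hc (List.mem_cons_of_mem _ h)
      by_cases hT : PySem.Str.isIn "Tile" l = true
      · simp only [pvBlockGen, pvGo]
        rw [if_pos hT, if_pos hT]
        exact ih _ _ _ hr
      · simp only [pvBlockGen, pvGo]
        rw [if_neg hT, if_neg hT, if_neg hl]
        exact ih _ _ _ hr

-- pvGo consumes a blank-free prefix exactly as pvBlockGen does, then flushes at the blank
lemma pvGo_append_blank (cur : List String) :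
    ∀ (t : pvTiles) (n : Option String) (g : List String) (rest : List String), "" ∉ cur →
      pvGo t n g (cur ++ "" :: rest) = pvGo (pvBlockGen t n g cur) none [] rest := by
  induction cur with
  | nil =>
      intro t n g rest _
      have hT' : ¬ (PySem.Str.isIn "Tile" "" = true) := by decide
      show pvGo t n g ("" :: rest) = _
      simp only [pvGo, pvBlockGen]
      rw [if_neg hT']
      simp
  | cons l curr ih =>
      intro t n g rest hc
      have hl : l ≠ "" := fun h => hc (h ▸ List.mem_cons_self)
      have hr : "" ∉ curr := fun h => hc (List.mem_cons_of_mem _ h)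
      rw [List.cons_append]
      by_cases hT : PySem.Str.isIn "Tile" l = true
      · simp only [pvGo, pvBlockGen]
        rw [if_pos hT, if_pos hT]
        exact ih _ _ _ _ hr
      · simp only [pvGo, pvBlockGen]
        rw [if_neg hT, if_neg hT, if_neg hl]
        exact ih _ _ _ _ hr

-- pvBlockB (filter + header fold, as Source B writes it) is pvBlockGen with fresh state
lemma pvBlockB_eq_pvBlockGen (block : List String) :
    ∀ (t : pvTiles) (n : Option String) (g : List String),
      pvFlushB (block.foldl
          (fun (p : pvTiles × Option String) line =>
            if PySem.Str.isIn "Tile" line then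
              (p.1.insert (pvParseNum line) PySem.Dict.empty, some (pvParseNum line))
            else p) (t, n)).1
        (block.foldl
          (fun (p : pvTiles × Option String) line =>
            if PySem.Str.isIn "Tile" line then
              (p.1.insert (pvParseNum line) PySem.Dict.empty, some (pvParseNum line))
            else p) (t, n)).2
        (g ++ block.filter (fun line => !PySem.Str.isIn "Tile" line))
      = pvBlockGen t n g block := by
  induction block with
  | nil => intro t n g; simp only [List.foldl_nil, List.filter_nil, List.append_nil]; rfl
  | cons l rest ih =>
      intro t n g
      rw [List.foldl_cons, List.filter_cons]
      by_cases hT : PySem.Str.isIn "Tile" l = true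
      · rw [if_pos hT]
        have hf : (!PySem.Str.isIn "Tile" l) = false := by rw [hT]; rfl
        rw [hf]
        simp only [Bool.false_eq_true, if_neg, not_false_iff, pvBlockGen]
        rw [if_pos hT]
        exact ih _ _ _
      · have hF : PySem.Str.isIn "Tile" l = false := Bool.eq_false_iff.mpr hT
        rw [if_neg hT]
        have hf : (!PySem.Str.isIn "Tile" l) = true := by rw [hF]; rfl
        rw [hf]
        simp only [if_pos, pvBlockGen]
        rw [if_neg hT]
        rw [← ih t n (g ++ [l])]
        rw [show g ++ l :: List.filter (fun line => !PySem.Str.isIn "Tile" line) rest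
            = (g ++ [l]) ++ List.filter (fun line => !PySem.Str.isIn "Tile" line) rest
          by simp]
  
lemma pvBlockB_eq (t : pvTiles) (block : List String) :
    pvBlockB t block = pvBlockGen t none [] block := by
  unfold pvBlockB
  exact pvBlockB_eq_pvBlockGen block t none []

lemma pvBlocks_ne_nil (cur data : List String) : pvBlocks cur data ≠ [] := by
  induction data generalizing cur with
  | nil => simp [pvBlocks]
  | cons l rest ih =>
      by_cases hl : l = "" <;> simp [pvBlocks, hl, ih]

-- the block fold equals pvGo on cur ++ data, the first block continuing from (t, n, g)
lemma pvBlocksFold_eq_pvGo (data : List String) :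
    ∀ (cur : List String) (t : pvTiles) (n : Option String) (g : List String), "" ∉ cur →
      (match pvBlocks cur data with
       | [] => t
       | b :: bs => bs.foldl pvBlockB (pvBlockGen t n g b)) = pvGo t n g (cur ++ data) := by
  induction data with
  | nil =>
      intro cur t n g hc
      simp only [pvBlocks, List.foldl_nil, List.append_nil]
      exact pvBlockGen_eq_pvGo cur t n g hc
  | cons l rest ih =>
      intro cur t n g hc
      by_cases hl : l = ""
      · subst hl
        have hpv : pvBlocks cur ("" :: rest) = cur :: pvBlocks [] rest := by
          simp [pvBlocks]
        rw [hpv]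
        show List.foldl pvBlockB (pvBlockGen t n g cur) (pvBlocks [] rest) = _
        rw [pvGo_append_blank cur t n g rest hc]
        rcases hb : pvBlocks [] rest with _ | ⟨b0, bs0⟩
        · exact absurd hb (pvBlocks_ne_nil [] rest)
        · have h2 := ih [] (pvBlockGen t n g cur) none [] (by simp)
          rw [hb] at h2
          simp only [List.nil_append] at h2
          have h2' : List.foldl pvBlockB (pvBlockGen (pvBlockGen t n g cur) none [] b0) bs0
              = pvGo (pvBlockGen t n g cur) none [] rest := h2
          rw [List.foldl_cons, pvBlockB_eq, h2']
      · have hpv : pvBlocks cur (l :: rest) = pvBlocks (cur ++ [l]) rest := by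
          simp [pvBlocks, hl]
        rw [hpv]
        rw [ih (cur ++ [l]) t n g (by
          intro h
          rcases List.mem_append.mp h with h' | h'
          · exact hc h'
          · exact hl (List.mem_singleton.mp h').symm)]
        simp

-- ===== VERDICT (by name: the statement is the Claim_ definition above) =====
theorem process_grids_spec : Claim_equal_process_grids := by
  intro data _ _
  show process_grids data = process_grids_alt data
  unfold process_grids process_grids_alt
  have hA := pvA_eq_pvGo data PySem.Dict.empty none [] (by intro k hk; cases hk)
  rw [hA]
  have hB := pvBlocksFold_eq_pvGo data [] PySem.Dict.empty none [] (by simp)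
  simp only [List.nil_append] at hB
  rcases hb : pvBlocks [] data with _ | ⟨b0, bs0⟩
  · exact absurd hb (pvBlocks_ne_nil [] data)
  · rw [hb] at hB
    have hB' : List.foldl pvBlockB (pvBlockGen PySem.Dict.empty none [] b0) bs0
        = pvGo PySem.Dict.empty none [] data := hB
    rw [List.foldl_cons, pvBlockB_eq, hB']
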